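-- pv_equiv track=rewrite | github.com/aevans-eng/portfolio-site | qdd-gearbox/images/generate_catia_tree.py | compute_continuing_lines
-- ===== SOURCE A (Python) =====
-- def compute_continuing_lines(tree, last_flags):
--     """For each row, return set of indent levels that have a vertical line passing through."""
--     # Track which levels still have children coming
--     active_levels = set()
--     result = []
--     for i in range(len(tree)):
--         level = tree[i][0]
--         # Remove levels >= current (they ended or we're replacing)
--         active_levels = {l for l in active_levels if l < level}
--         # This row's level is active unless it's the last child
--         if not last_flags[i] and level > 0:
--             active_levels.add(level)
--         result.append(set(active_levels))
--     return result
-- ===== SOURCE B (Python) =====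
-- def compute_continuing_lines(tree, last_flags):
--     """For each row, return set of indent levels that have a vertical line passing through."""
--     result = []
--     for j in range(len(tree)):
--         # Scan backwards from row j, collecting the chain of ancestor levels top-down:
--         # m is the highest level a line could still occupy when we reach row k.
--         found = []
--         m = tree[j][0]
--         for k in range(j, -1, -1):
--             if m < 1:
--                 break
--             lev = tree[k][0]
--             if lev <= m:
--                 if lev >= 1 and not last_flags[k]:
--                     found.append(lev)
--                 m = lev - 1
--         found.reverse()
--         result.append(set(found))
--     return result
-- ===== Notes on version B (the rewrite author's own statement) =====
-- stated objective: alternative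
-- what changed: B computes each row's set independently by a backward scan from that row that follows the ancestor chain (tracking the highest level m a line could still occupy), instead of A's single forward pass threading one shared active-level set through all rows.
import Mathlib
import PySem

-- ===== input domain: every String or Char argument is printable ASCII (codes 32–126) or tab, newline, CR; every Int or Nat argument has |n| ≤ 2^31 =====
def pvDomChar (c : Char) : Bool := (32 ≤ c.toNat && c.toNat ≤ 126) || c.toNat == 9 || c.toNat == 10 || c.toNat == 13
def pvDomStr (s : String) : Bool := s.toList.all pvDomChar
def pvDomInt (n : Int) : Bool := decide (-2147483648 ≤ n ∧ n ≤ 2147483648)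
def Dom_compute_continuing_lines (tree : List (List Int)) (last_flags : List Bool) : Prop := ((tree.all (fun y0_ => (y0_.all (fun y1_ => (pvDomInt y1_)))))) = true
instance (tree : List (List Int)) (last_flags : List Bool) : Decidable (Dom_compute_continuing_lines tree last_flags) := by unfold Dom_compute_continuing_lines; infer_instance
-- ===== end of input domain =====

-- B re-derives each row's set by a backward ancestor-chain scan from that row, instead of
-- A's forward pass threading one shared active-level set; same values, different decomposition.

-- ===== PORT A =====
-- forward pass: fold each row into the shared active-level set, appending a snapshot per row
def clA_go : List (List Int) → List Bool → List Int → List (List Int)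
  | [], _, _ => []
  | row :: rt, flags, active =>
      let level := (PySem.List.pyGet? row 0).getD 0
      let a1 := active.filter (fun l => decide (l < level))
      let flag := (flags.head?).getD true
      let a2 := if flag = false ∧ level > 0 then PySem.Set.add a1 level else a1
      a2 :: clA_go rt flags.tail a2

def compute_continuing_lines (tree : List (List Int)) (last_flags : List Bool) : List (List Int) :=
  clA_go tree last_flags []

-- ===== PORT B =====
-- inner while-loop of Source B: k runs backwards over the rows already seen (held reversed),
-- m is the highest level a line could still occupy; stops when m < 1
def clB_back : List (List Int) → List Bool → Int → List Int
  | [], _, _ => []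
  | row :: rt, flags, m =>
      if m < 1 then []
      else
        let lev := (PySem.List.pyGet? row 0).getD 0
        if lev ≤ m then
          (if 1 ≤ lev ∧ (flags.head?).getD true = false then [lev] else [])
            ++ clB_back rt flags.tail (lev - 1)
        else clB_back rt flags.tail m

-- outer loop of Source B over j: carries the already-visited rows/flags reversed (the k-descending order)
def clB_rows : List (List Int) → List Bool → List (List Int) → List Bool → List (List Int)
  | _, _, [], _ => []
  | revp, revpf, row :: t, fs =>
      let lev := (PySem.List.pyGet? row 0).getD 0
      let flag := (fs.head?).getD true
      PySem.Set.ofList (clB_back (row :: revp) (flag :: revpf) lev).reverse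
        :: clB_rows (row :: revp) (flag :: revpf) t fs.tail

def compute_continuing_lines_alt (tree : List (List Int)) (last_flags : List Bool) : List (List Int) :=
  clB_rows [] [] tree last_flags

-- ===== PRECONDITION & SPEC =====
-- Pre_ excludes exactly the inputs on which the Python A raises:
-- an empty row (IndexError on tree[i][0]) or last_flags shorter than tree (IndexError on last_flags[i]).
def Pre_compute_continuing_lines (tree : List (List Int)) (last_flags : List Bool) : Prop :=
  (∀ row ∈ tree, row ≠ []) ∧ tree.length ≤ last_flags.length
instance (tree : List (List Int)) (last_flags : List Bool) : Decidable (Pre_compute_continuing_lines tree last_flags) := by unfold Pre_compute_continuing_lines; infer_instance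

def pvWitness_compute_continuing_lines : List (List Int) × List Bool :=
  ([[1], [2], [2], [1]], [false, false, true, true])

def Spec_compute_continuing_lines (tree : List (List Int)) (last_flags : List Bool) (out : List (List Int)) : Prop := out = compute_continuing_lines_alt tree last_flags
instance (tree : List (List Int)) (last_flags : List Bool) (out : List (List Int)) : Decidable (Spec_compute_continuing_lines tree last_flags out) := by unfold Spec_compute_continuing_lines; infer_instance

-- ===== CLAIM (what is proved, stated in full; the proofs are below) =====
def Claim_equal_compute_continuing_lines : Prop := ∀ (tree : List (List Int)) (last_flags : List Bool), Dom_compute_continuing_lines tree last_flags → Pre_compute_continuing_lines tree last_flags → Spec_compute_continuing_lines tree last_flags (compute_continuing_lines tree last_flags)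

-- ===== LEMMAS AND PROOFS =====

-- Invariant tying A's active set to B's backward scan:
-- filtering the active set at threshold m and reversing gives exactly clB_back's output.
def clInv (revp : List (List Int)) (revpf : List Bool) (active : List Int) : Prop :=
  ∀ m : Int, (active.filter (fun l => decide (l ≤ m))).reverse = clB_back revp revpf m

theorem clInv_pos {revp : List (List Int)} {revpf : List Bool} {active : List Int}
    (h : clInv revp revpf active) : ∀ l ∈ active, 1 ≤ l := by
  intro l hl
  by_contra hneg
  have h0 := h 0
  have hmem : l ∈ (active.filter (fun l => decide (l ≤ (0:Int)))).reverse := by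
    rw [List.mem_reverse]
    simp only [List.mem_filter, decide_eq_true_iff]
    exact ⟨hl, by omega⟩
  rw [h0] at hmem
  cases revp with
  | nil => simp [clB_back] at hmem
  | cons r rs => simp [clB_back] at hmem

theorem clInv_step (revp : List (List Int)) (revpf : List Bool) (active : List Int)
    (row : List Int) (flag : Bool)
    (h : clInv revp revpf active) :
    clInv (row :: revp) (flag :: revpf)
      ((if flag = false ∧ (PySem.List.pyGet? row 0).getD 0 > 0
        then PySem.Set.add (active.filter (fun l => decide (l < (PySem.List.pyGet? row 0).getD 0))) ((PySem.List.pyGet? row 0).getD 0)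
        else active.filter (fun l => decide (l < (PySem.List.pyGet? row 0).getD 0)))) := by
  intro m
  set lev := (PySem.List.pyGet? row 0).getD 0 with hlev
  have hpos := clInv_pos h
  have hnotmem : lev ∉ active.filter (fun l => decide (l < lev)) := by
    intro hm
    simp only [List.mem_filter, decide_eq_true_iff] at hm
    omega
  have hadd : PySem.Set.add (active.filter (fun l => decide (l < lev))) lev
      = active.filter (fun l => decide (l < lev)) ++ [lev] := by
    unfold PySem.Set.add
    rw [if_neg]
    intro hc
    exact hnotmem ((PySem.Set.contains_iff _ _).mp hc)
  -- shorthand: a2 = filtered ++ cond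
  have ha2 : (if flag = false ∧ lev > 0
        then PySem.Set.add (active.filter (fun l => decide (l < lev))) lev
        else active.filter (fun l => decide (l < lev)))
      = active.filter (fun l => decide (l < lev))
        ++ (if 1 ≤ lev ∧ flag = false then [lev] else []) := by
    by_cases hc : flag = false ∧ lev > 0
    · rw [if_pos hc, hadd, if_pos ⟨by omega, hc.1⟩]
    · rw [if_neg hc, if_neg (by intro hc'; exact hc ⟨hc'.2, by omega⟩), List.append_nil]
  rw [ha2]
  by_cases hm1 : m < 1
  · -- clB_back returns []; all elements are ≥ 1 so the filter is empty
    have : (active.filter (fun l => decide (l < lev))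
        ++ (if 1 ≤ lev ∧ flag = false then [lev] else [])).filter (fun l => decide (l ≤ m)) = [] := by
      rw [List.filter_append, List.filter_filter]
      have h1 : active.filter (fun a => decide (a ≤ m) && decide (a < lev)) = [] := by
        rw [List.filter_eq_nil_iff]
        intro a ha
        have := hpos a ha
        simp only [Bool.and_eq_true, decide_eq_true_iff]
        omega
      have h2 : (if 1 ≤ lev ∧ flag = false then [lev] else []).filter (fun l => decide (l ≤ m)) = [] := by
        split_ifs with hc
        · simp only [List.filter_cons, List.filter_nil]
          rw [if_neg (by simp only [decide_eq_true_iff]; omega)]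
        · rfl
      rw [h1, h2]
      rfl
    rw [this]
    unfold clB_back
    rw [if_pos hm1]
    rfl
  · unfold clB_back
    rw [if_neg hm1]
    simp only [← hlev, List.head?_cons, Option.getD_some, List.tail_cons]
    by_cases hle : lev ≤ m
    · rw [if_pos hle, ← h (lev - 1)]
      rw [List.filter_append, List.filter_filter, List.reverse_append]
      have hcond : (if 1 ≤ lev ∧ flag = false then [lev] else []).filter (fun l => decide (l ≤ m)) = (if 1 ≤ lev ∧ flag = false then [lev] else []) := by
        split_ifs with hc
        · simp only [List.filter_cons, List.filter_nil]
          rw [if_pos (by simp only [decide_eq_true_iff]; omega)]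
        · rfl
      rw [hcond]
      have hff : active.filter (fun a => decide (a ≤ m) && decide (a < lev)) = active.filter (fun l => decide (l ≤ lev - 1)) := by
        apply List.filter_congr
        intro a _
        rw [← Bool.decide_and, decide_eq_decide]
        omega
      rw [hff]
      congr 1
      split_ifs <;> rfl
    · rw [if_neg hle, ← h m]
      rw [List.filter_append, List.filter_filter]
      have h2 : (if 1 ≤ lev ∧ flag = false then [lev] else []).filter (fun l => decide (l ≤ m)) = [] := by
        split_ifs with hc
        · simp only [List.filter_cons, List.filter_nil]
          rw [if_neg (by simp only [decide_eq_true_iff]; omega)]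
        · rfl
      have h1 : active.filter (fun a => decide (a ≤ m) && decide (a < lev)) = active.filter (fun l => decide (l ≤ m)) := by
        apply List.filter_congr
        intro a _
        rw [← Bool.decide_and, decide_eq_decide]
        omega
      rw [h1, h2, List.append_nil]

-- main induction: A's forward pass equals B's per-row backward scans, given the invariant
theorem clA_eq_clB_rows : ∀ (t : List (List Int)) (fs : List Bool)
    (revp : List (List Int)) (revpf : List Bool) (active : List Int),
    clInv revp revpf active → active.Pairwise (· < ·) →
    clA_go t fs active = clB_rows revp revpf t fs := by
  intro t
  induction t with
  | nil => intro fs revp revpf active _ _; rfl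
  | cons row rt ih =>
      intro fs revp revpf active hinv hpw
      set lev := (PySem.List.pyGet? row 0).getD 0 with hlev
      set flag := (fs.head?).getD true with hflag
      set a2 := (if flag = false ∧ lev > 0
          then PySem.Set.add (active.filter (fun l => decide (l < lev))) lev
          else active.filter (fun l => decide (l < lev))) with ha2
      have hinv' : clInv (row :: revp) (flag :: revpf) a2 := clInv_step revp revpf active row flag hinv
      have hpos' := clInv_pos hinv'
      have hbnd : ∀ l ∈ a2, l ≤ lev := by
        intro l hl
        rw [ha2] at hl
        by_cases hc : flag = false ∧ lev > 0
        · rw [if_pos hc] at hl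
          unfold PySem.Set.add at hl
          split_ifs at hl with h'
          · simp only [List.mem_filter, decide_eq_true_iff] at hl; omega
          · rcases List.mem_append.mp hl with h1 | h1
            · simp only [List.mem_filter, decide_eq_true_iff] at h1; omega
            · simp only [List.mem_singleton] at h1; omega
        · rw [if_neg hc] at hl
          simp only [List.mem_filter, decide_eq_true_iff] at hl; omega
      have hpw' : a2.Pairwise (· < ·) := by
        rw [ha2]
        have hfpw : (active.filter (fun l => decide (l < lev))).Pairwise (· < ·) :=
          hpw.sublist List.filter_sublist
        by_cases hc : flag = false ∧ lev > 0
        · rw [if_pos hc]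
          unfold PySem.Set.add
          split_ifs with h'
          · exact hfpw
          · rw [List.pairwise_append]
            refine ⟨hfpw, List.pairwise_singleton _ _, ?_⟩
            intro a ha b hb
            simp only [List.mem_filter, decide_eq_true_iff] at ha
            simp only [List.mem_singleton] at hb
            omega
        · rw [if_neg hc]; exact hfpw
      -- head: a2 equals B's set for this row
      have hfilt : a2.filter (fun l => decide (l ≤ lev)) = a2 := by
        rw [List.filter_eq_self]
        intro a ha
        simp only [decide_eq_true_iff]
        exact hbnd a ha
      have hhead : PySem.Set.ofList (clB_back (row :: revp) (flag :: revpf) lev).reverse = a2 := by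
        rw [← hinv' lev, hfilt, List.reverse_reverse]
        exact PySem.Set.ofList_eq_self_of_nodup _ hpw'.nodup
      show a2 :: clA_go rt fs.tail a2 = _ :: clB_rows (row :: revp) (flag :: revpf) rt fs.tail
      rw [hhead, ih fs.tail (row :: revp) (flag :: revpf) a2 hinv' hpw']

-- ===== VERDICT (by name: the statement is the Claim_ definition above) =====
theorem compute_continuing_lines_spec : Claim_equal_compute_continuing_lines := by
  intro tree last_flags _ _
  show clA_go tree last_flags [] = clB_rows [] [] tree last_flags
  apply clA_eq_clB_rows
  · intro m
    simp [clB_back]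
  · exact List.Pairwise.nil
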